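-- pv_equiv track=rewrite | github.com/kdh12345/AlgorithmStudy | 프로그래머스/2/42586. 기능개발/기능개발.py | solution
-- ===== SOURCE A (Python) =====
-- from collections import Counter
--
-- def solution(progresses, speeds):
--     answer = []
--     stk = []
--     for i in range(len(progresses)):
--         diff = 0
--         if (100-progresses[i]) % speeds[i] == 0:
--             diff = (100-progresses[i])//speeds[i]
--         else:
--             diff = (100-progresses[i])//speeds[i] + 1
--         if len(stk) > 0 and stk[-1] > diff:
--             diff = stk[-1]
--         stk.append(diff)
--     cnts = Counter(stk)
--     res = []
--     for i,c in cnts.items():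
--         res.append(c)
--     for item in res:
--         answer.append(item)
--     return answer
-- ===== SOURCE B (Python) =====
-- def solution(progresses, speeds):
--     answer = []
--     front = 0
--     count = 0
--     for p, s in zip(progresses, speeds):
--         days = (100 - p) // s + ((100 - p) % s != 0)
--         if count != 0 and days <= front:
--             count += 1
--         else:
--             if count != 0:
--                 answer.append(count)
--             front = days
--             count = 1
--     if count != 0:
--         answer.append(count)
--     return answer
-- ===== Notes on version B (the rewrite author's own statement) =====
-- stated objective: idiomatic
-- what changed: A builds the full running-max day list, feeds it to Counter and copies the counts through two more lists; B does one fused run-length pass over zip(progresses, speeds) keeping only the current group's finishing day and size.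
-- outside the precondition, e.g. on solution([50], [0]): A raises ZeroDivisionError, B raises ZeroDivisionError; on solution([50, 50], [1]): A raises IndexError, B returns [1]
import Mathlib
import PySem

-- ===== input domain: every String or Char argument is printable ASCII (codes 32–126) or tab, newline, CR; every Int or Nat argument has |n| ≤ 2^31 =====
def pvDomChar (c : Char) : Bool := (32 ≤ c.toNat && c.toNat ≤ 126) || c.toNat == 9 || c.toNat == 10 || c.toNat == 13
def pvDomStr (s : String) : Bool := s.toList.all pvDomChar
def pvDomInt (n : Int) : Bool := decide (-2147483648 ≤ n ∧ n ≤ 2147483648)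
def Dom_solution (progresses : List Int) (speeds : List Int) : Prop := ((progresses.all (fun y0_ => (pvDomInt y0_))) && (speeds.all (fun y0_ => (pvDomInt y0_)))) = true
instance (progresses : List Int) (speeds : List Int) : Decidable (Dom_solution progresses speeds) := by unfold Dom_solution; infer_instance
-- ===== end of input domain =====

-- B replaces A's build-full-day-list / running-max / Counter / two copy loops by one fused
-- run-length pass keeping only the current group's finishing day and size (objective: idiomatic).

-- ===== PORT A =====
def solution (progresses : List Int) (speeds : List Int) : List Int :=
  let answer : List Int := []
  let stk : List Int :=
    (PySem.List.pyRange 0 (PySem.List.len progresses)).foldl (fun stk i =>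
      let diff : Int := 0
      let diff :=
        if PySem.Int.mod (100 - PySem.List.pyGetD progresses i 0) (PySem.List.pyGetD speeds i 0) = 0
        then PySem.Int.floordiv (100 - PySem.List.pyGetD progresses i 0) (PySem.List.pyGetD speeds i 0)
        else PySem.Int.floordiv (100 - PySem.List.pyGetD progresses i 0) (PySem.List.pyGetD speeds i 0) + 1
      let diff := if 0 < stk.length ∧ diff < PySem.List.pyGetD stk (-1) 0 then PySem.List.pyGetD stk (-1) 0 else diff
      stk ++ [diff]) []
  let cnts := PySem.Dict.counter stk
  let res := cnts.items.foldl (fun res ic => res ++ [ic.2]) ([] : List Int)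
  res.foldl (fun answer item => answer ++ [item]) answer

-- ===== PORT B =====
def pvDays (p : Int) (s : Int) : Int :=
  PySem.Int.floordiv (100 - p) s + (if PySem.Int.mod (100 - p) s ≠ 0 then 1 else 0)

def pvAltGo : List (Int × Int) → List Int → Int → Int → List Int
  | [], answer, _front, count => if count ≠ 0 then answer ++ [count] else answer
  | (p, s) :: rest, answer, front, count =>
    let days := pvDays p s
    if count ≠ 0 ∧ days ≤ front then pvAltGo rest answer front (count + 1)
    else pvAltGo rest (if count ≠ 0 then answer ++ [count] else answer) days 1

def solution_alt (progresses : List Int) (speeds : List Int) : List Int :=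
  pvAltGo (progresses.zip speeds) [] 0 0

-- ===== PRECONDITION & SPEC =====
-- A raises IndexError when speeds is shorter than progresses, and ZeroDivisionError when one of
-- the used speeds is 0; Pre_ excludes exactly those inputs.
def Pre_solution (progresses : List Int) (speeds : List Int) : Prop :=
  progresses.length ≤ speeds.length ∧ (0 : Int) ∉ speeds.take progresses.length
instance (progresses : List Int) (speeds : List Int) : Decidable (Pre_solution progresses speeds) := by
  unfold Pre_solution; infer_instance

def pvWitness_solution : List Int × List Int := ([93, 30, 55], [1, 30, 5])

def Spec_solution (progresses : List Int) (speeds : List Int) (out : List Int) : Prop := out = solution_alt progresses speeds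
instance (progresses : List Int) (speeds : List Int) (out : List Int) : Decidable (Spec_solution progresses speeds out) := by unfold Spec_solution; infer_instance

-- ===== CLAIM (what is proved, stated in full; the proofs are below) =====
def Claim_equal_solution : Prop := ∀ (progresses : List Int) (speeds : List Int), Dom_solution progresses speeds → Pre_solution progresses speeds → Spec_solution progresses speeds (solution progresses speeds)

-- ===== LEMMAS AND PROOFS =====

def pvGroups : List Int → Int → Int → List (Int × Int)
  | [], front, count => [(front, count)]
  | d :: rest, front, count =>
    if d ≤ front then pvGroups rest front (count + 1)
    else (front, count) :: pvGroups rest d 1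

lemma pvDays_eq (p s : Int) :
    (if PySem.Int.mod (100 - p) s = 0
     then PySem.Int.floordiv (100 - p) s
     else PySem.Int.floordiv (100 - p) s + 1) = pvDays p s := by
  unfold pvDays; split_ifs with h h2 <;> simp_all

lemma pvAltGo_eq (l : List (Int × Int)) (ans : List Int) (front count : Int) (hc : 1 ≤ count) :
    pvAltGo l ans front count
      = ans ++ (pvGroups (l.map (fun x => pvDays x.1 x.2)) front count).map Prod.snd := by
  induction l generalizing ans front count with
  | nil =>
    simp only [pvAltGo, pvGroups, List.map_nil, List.map_cons]
    rw [if_pos (by omega : count ≠ 0)]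
  | cons x rest ih =>
    obtain ⟨p, s⟩ := x
    simp only [pvAltGo, List.map_cons, pvGroups]
    by_cases hle : pvDays p s ≤ front
    · rw [if_pos ⟨by omega, hle⟩, if_pos hle, ih _ _ _ (by omega)]
    · rw [if_neg (by tauto), if_pos (by omega : count ≠ 0), if_neg hle, ih _ _ _ (by omega)]
      simp

def pvFlat (G : List (Int × Int)) : List Int :=
  G.flatMap (fun vc => List.replicate vc.2.toNat vc.1)
def pvStep (stk : List Int) (d : Int) : List Int :=
  stk ++ [if 0 < stk.length ∧ d < PySem.List.pyGetD stk (-1) 0 then PySem.List.pyGetD stk (-1) 0 else d]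
lemma pyGetD_last_append (xs : List Int) (y : Int) :
    PySem.List.pyGetD (xs ++ [y]) (-1) 0 = y := by
  simp [PySem.List.pyGetD, PySem.List.pyGet?, PySem.List.pyIdx?]

lemma rep_last (pre : List Int) (front : Int) (n : Nat) (hn : 1 ≤ n) :
    pre ++ List.replicate n front = (pre ++ List.replicate (n - 1) front) ++ [front] := by
  rw [List.append_assoc]
  congr 1
  rw [show n = (n-1)+1 by omega, List.replicate_succ']
  simp

lemma pvScan_eq (ds : List Int) (pre : List Int) (front count : Int) (hc : 1 ≤ count) :
    ds.foldl pvStep (pre ++ List.replicate count.toNat front)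
      = pre ++ pvFlat (pvGroups ds front count) := by
  induction ds generalizing pre front count with
  | nil => simp [pvFlat, pvGroups]
  | cons d rest ih =>
    have hlast : PySem.List.pyGetD (pre ++ List.replicate count.toNat front) (-1) 0 = front := by
      rw [rep_last pre front count.toNat (by omega)]
      exact pyGetD_last_append _ _
    have hlen : 0 < (pre ++ List.replicate count.toNat front).length := by
      simp; omega
    simp only [List.foldl_cons, pvGroups]
    by_cases hle : d ≤ front
    · rw [if_pos hle]
      have hstep : pvStep (pre ++ List.replicate count.toNat front) d
          = pre ++ List.replicate (count + 1).toNat front := by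
        unfold pvStep
        rw [hlast]
        by_cases hlt : d < front
        · rw [if_pos ⟨hlen, hlt⟩, List.append_assoc, show (count+1).toNat = count.toNat + 1 by omega, List.replicate_succ']
        · have : d = front := by omega
          subst this
          rw [if_neg (by tauto), List.append_assoc, show (count+1).toNat = count.toNat + 1 by omega, List.replicate_succ']
      rw [hstep, ih _ _ _ (by omega)]
    · rw [if_neg hle]
      have hstep : pvStep (pre ++ List.replicate count.toNat front) d
          = (pre ++ List.replicate count.toNat front) ++ List.replicate (1:Int).toNat d := by
        unfold pvStep
        rw [hlast, if_neg (by omega)]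
        rfl
      rw [hstep, ih _ _ _ (by omega)]
      simp only [pvFlat, List.flatMap_cons, List.append_assoc]

lemma pvGroups_pos (ds : List Int) (front count : Int) (hc : 1 ≤ count) :
    ∀ p ∈ pvGroups ds front count, 1 ≤ p.2 := by
  induction ds generalizing front count with
  | nil => simp [pvGroups]; omega
  | cons d rest ih =>
    intro p hp
    simp only [pvGroups] at hp
    by_cases hle : d ≤ front
    · rw [if_pos hle] at hp; exact ih _ _ (by omega) p hp
    · rw [if_neg hle, List.mem_cons] at hp
      rcases hp with h | h
      · subst h; exact hc
      · exact ih _ _ (by omega) p h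

lemma pvGroups_fst (ds : List Int) (front count : Int) :
    ((pvGroups ds front count).map Prod.fst).Pairwise (· < ·)
      ∧ ∀ x ∈ (pvGroups ds front count).map Prod.fst, front ≤ x := by
  induction ds generalizing front count with
  | nil => simp [pvGroups]
  | cons d rest ih =>
    simp only [pvGroups]
    by_cases hle : d ≤ front
    · rw [if_pos hle]; exact ih front (count + 1)
    · rw [if_neg hle]
      obtain ⟨hpw, hge⟩ := ih d 1
      refine ⟨?_, ?_⟩
      · simp only [List.map_cons, List.pairwise_cons]
        exact ⟨fun x hx => by have := hge x hx; omega, hpw⟩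
      · intro x hx
        simp only [List.map_cons, List.mem_cons] at hx
        rcases hx with h | h
        · omega
        · have := hge x h; omega

lemma pvFlat_mem (G : List (Int × Int)) (x : Int) (hx : x ∈ pvFlat G) : x ∈ G.map Prod.fst := by
  simp only [pvFlat, List.mem_flatMap] at hx
  obtain ⟨vc, hvc, hmem⟩ := hx
  rw [List.eq_of_mem_replicate hmem]
  exact List.mem_map_of_mem hvc

lemma set_add_mem (s : PySem.Set Int) (v : Int) (h : v ∈ s) : PySem.Set.add s v = s := by
  simp [PySem.Set.add, PySem.Set.contains, h]

lemma set_add_not_mem (s : PySem.Set Int) (v : Int) (h : v ∉ s) : PySem.Set.add s v = s ++ [v] := by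
  simp [PySem.Set.add, PySem.Set.contains, h]

lemma foldl_add_replicate (n : Nat) (v : Int) (s : PySem.Set Int) :
    (List.replicate n v).foldl PySem.Set.add s
      = if v ∈ s ∨ n = 0 then s else s ++ [v] := by
  induction n generalizing s with
  | zero => simp
  | succ m ih =>
    rw [List.replicate_succ, List.foldl_cons]
    by_cases h : v ∈ s
    · rw [set_add_mem s v h, ih]; simp [h]
    · rw [set_add_not_mem s v h, ih]
      simp [h]

lemma pvOfList_flat_aux (G : List (Int × Int)) (s : PySem.Set Int)
    (hnd : (G.map Prod.fst).Nodup) (hpos : ∀ p ∈ G, 1 ≤ p.2)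
    (hdisj : ∀ v ∈ G.map Prod.fst, v ∉ s) :
    (pvFlat G).foldl PySem.Set.add s = s ++ G.map Prod.fst := by
  induction G generalizing s with
  | nil => simp [pvFlat]
  | cons vc G' ih =>
    obtain ⟨v, c⟩ := vc
    simp only [pvFlat, List.flatMap_cons, List.foldl_append] at *
    have hv : v ∉ s := hdisj v (by simp)
    have hc : 1 ≤ c := hpos (v, c) (by simp)
    rw [foldl_add_replicate, if_neg (by push Not; exact ⟨hv, by omega⟩)]
    rw [List.map_cons, List.nodup_cons] at hnd
    rw [ih (s ++ [v]) hnd.2 (fun p hp => hpos p (by simp [hp]))]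
    · simp
    · intro w hw
      simp only [List.mem_append, List.mem_singleton]
      push Not
      constructor
      · exact hdisj w (by simp [hw])
      · rintro rfl; exact hnd.1 hw

lemma pvOfList_flat (G : List (Int × Int)) (hp : (G.map Prod.fst).Pairwise (· < ·))
    (hpos : ∀ p ∈ G, 1 ≤ p.2) :
    PySem.Set.ofList (pvFlat G) = G.map Prod.fst := by
  rw [PySem.Set.ofList_eq_foldl]
  have := pvOfList_flat_aux G [] (hp.imp (fun h => by omega)).nodup hpos (by simp)
  simpa using this

lemma pvCounts_flat (G : List (Int × Int)) (hp : (G.map Prod.fst).Pairwise (· < ·))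
    (hpos : ∀ p ∈ G, 1 ≤ p.2) :
    (G.map Prod.fst).map (fun k => ((pvFlat G).count k : Int)) = G.map Prod.snd := by
  induction G with
  | nil => simp
  | cons vc G' ih =>
    obtain ⟨v, c⟩ := vc
    rw [List.map_cons] at hp
    have hpw := hp
    rw [List.pairwise_cons] at hpw
    have hvnot : v ∉ G'.map Prod.fst := fun h => by have := hpw.1 v h; omega
    have hc : 1 ≤ c := hpos (v, c) (by simp)
    have hflat : pvFlat ((v, c) :: G') = List.replicate c.toNat v ++ pvFlat G' := by
      simp [pvFlat]
    simp only [List.map_cons, hflat]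
    congr 1
    · have h0 : (pvFlat G').count v = 0 :=
        List.count_eq_zero.mpr (fun h => hvnot (pvFlat_mem G' v h))
      rw [List.count_append, h0, List.count_replicate]
      simp; omega
    · rw [← ih hpw.2 (fun p hp' => hpos p (by simp [hp']))]
      apply List.map_congr_left
      intro k hk
      have hkv : k ≠ v := fun h => hvnot (h ▸ hk)
      rw [List.count_append, List.count_replicate, if_neg (by simpa using hkv.symm)]
      simp
theorem pv_final (ps ss : List Int) (hlen : ps.length ≤ ss.length) :
    solution ps ss = solution_alt ps ss := by
  have hzlen : (ps.zip ss).length = ps.length := by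
    rw [List.length_zip]; omega
  have hunfold : solution ps ss
      = List.foldl (fun answer item => answer ++ [item]) []
          (List.foldl (fun res ic => res ++ [ic.2]) ([] : List Int)
            (PySem.Dict.counter
              ((PySem.List.pyRange 0 (PySem.List.len ps)).foldl (fun stk i =>
                let diff : Int := 0
                let diff :=
                  if PySem.Int.mod (100 - PySem.List.pyGetD ps i 0) (PySem.List.pyGetD ss i 0) = 0
                  then PySem.Int.floordiv (100 - PySem.List.pyGetD ps i 0) (PySem.List.pyGetD ss i 0)
                  else PySem.Int.floordiv (100 - PySem.List.pyGetD ps i 0) (PySem.List.pyGetD ss i 0) + 1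
                let diff := if 0 < stk.length ∧ diff < PySem.List.pyGetD stk (-1) 0 then PySem.List.pyGetD stk (-1) 0 else diff
                stk ++ [diff]) [])).items) := rfl
  rw [hunfold]
  -- stage 1: the index loop is a fold over the zipped list of day values
  have hstk : (PySem.List.pyRange 0 (PySem.List.len ps)).foldl (fun stk i =>
      let diff : Int := 0
      let diff :=
        if PySem.Int.mod (100 - PySem.List.pyGetD ps i 0) (PySem.List.pyGetD ss i 0) = 0
        then PySem.Int.floordiv (100 - PySem.List.pyGetD ps i 0) (PySem.List.pyGetD ss i 0)
        else PySem.Int.floordiv (100 - PySem.List.pyGetD ps i 0) (PySem.List.pyGetD ss i 0) + 1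
      let diff := if 0 < stk.length ∧ diff < PySem.List.pyGetD stk (-1) 0 then PySem.List.pyGetD stk (-1) 0 else diff
      stk ++ [diff]) []
      = ((ps.zip ss).map (fun x => pvDays x.1 x.2)).foldl pvStep [] := by
    have hlenq : PySem.List.len ps = PySem.List.len (ps.zip ss) := by
      simp [PySem.List.len, hzlen]
    rw [hlenq]
    rw [PySem.List.foldl_congr_mem _ _
      (fun acc j => pvStep acc (pvDays (PySem.List.pyGetD (ps.zip ss) j (0, 0)).1
        (PySem.List.pyGetD (ps.zip ss) j (0, 0)).2)) _ ?_]
    · rw [PySem.List.foldl_pyRange_pyGetD (ps.zip ss) (0, 0)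
        (fun acc pr => pvStep acc (pvDays pr.1 pr.2)) [] le_rfl]
      rw [List.foldl_map]
      simp
    · intro acc i hi
      dsimp only
      rw [PySem.List.mem_pyRange_one] at hi
      simp only [PySem.List.len, hzlen] at hi
      have h0 : 0 ≤ i := hi.1
      have h1 : i < (ps.length : Int) := hi.2
      rw [PySem.List.pyGetD_eq_getElem ps 0 h0 h1,
          PySem.List.pyGetD_eq_getElem ss 0 h0 (by omega),
          PySem.List.pyGetD_eq_getElem (ps.zip ss) (0, 0) h0 (by rw [hzlen]; omega)]
      simp only [List.getElem_zip]
      rw [pvDays_eq]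
      simp [pvStep]
  rw [hstk]
  -- stage 2: Counter → run-length counts
  rw [PySem.List.foldl_append_singleton_eq_map (f := fun ic : Int × Int => ic.2)]
  rw [PySem.Dict.items_counter]
  rw [PySem.List.foldl_append_singleton_eq_self]
  simp only [List.nil_append, List.map_map]
  rcases hz : ps.zip ss with _ | ⟨z, zr⟩
  · simp [hz, solution_alt, pvAltGo, PySem.Set.ofList]
  · have hsplit : ((z :: zr).map (fun x => pvDays x.1 x.2)).foldl pvStep []
        = pvFlat (pvGroups (zr.map (fun x => pvDays x.1 x.2)) (pvDays z.1 z.2) 1) := by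
      rw [List.map_cons, List.foldl_cons]
      have hfirst : pvStep [] (pvDays z.1 z.2)
          = [] ++ List.replicate ((1:Int)).toNat (pvDays z.1 z.2) := by
        simp [pvStep]
      rw [hfirst, pvScan_eq _ _ _ _ le_rfl]
      simp
    rw [hsplit]
    have hpw := (pvGroups_fst (zr.map (fun x => pvDays x.1 x.2)) (pvDays z.1 z.2) 1).1
    have hpos := pvGroups_pos (zr.map (fun x => pvDays x.1 x.2)) (pvDays z.1 z.2) 1 le_rfl
    rw [pvOfList_flat _ hpw hpos]
    have := pvCounts_flat (pvGroups (zr.map (fun x => pvDays x.1 x.2)) (pvDays z.1 z.2) 1) hpw hpos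
    simp only [Function.comp_def]
    rw [this]
    -- B side
    simp only [solution_alt, hz, pvAltGo]
    rw [if_neg (by simp), if_neg (by simp)]
    rw [pvAltGo_eq _ _ _ _ le_rfl]
    simp

-- ===== VERDICT (by name: the statement is the Claim_ definition above) =====
theorem solution_spec : Claim_equal_solution := by
  intro ps ss _hdom hpre
  unfold Spec_solution
  exact pv_final ps ss hpre.1
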